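-- pv_equiv track=rewrite | github.com/ShuvalovAnthony/ez_python | Karen/9/theory.py | check
-- ===== SOURCE A (Python) =====
-- def check(row: list):
--     povtor_2 = []
--     povtor_3 = []
--     uniq = []
--
--
--     for num in row:
--         if row.count(num) == 3:
--             povtor_3.append(num)
--         if row.count(num) == 2:
--             povtor_2.append(num)
--         if row.count(num) == 1:
--             uniq.append(num)
--
--     return (
--         (len(povtor_3) == 3) and
--         (len(povtor_2) == 2) and
--         (len(uniq) == 3)
--     )
-- ===== SOURCE B (Python) =====
-- def check(row: list):
--     c = {}
--     for x in row:
--         c[x] = c.get(x, 0) + 1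
--     meta = {}
--     for v in c.values():
--         meta[v] = meta.get(v, 0) + 1
--     return meta.get(3, 0) == 1 and meta.get(2, 0) == 1 and meta.get(1, 0) == 3
-- ===== Notes on version B (the rewrite author's own statement) =====
-- stated objective: faster
-- what changed: Replaces the per-element repeated row.count scans and three bucket lists by a single frequency dict followed by a histogram of multiplicities, checking that exactly one value occurs three times, exactly one occurs twice and exactly three occur once.
import Mathlib
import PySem

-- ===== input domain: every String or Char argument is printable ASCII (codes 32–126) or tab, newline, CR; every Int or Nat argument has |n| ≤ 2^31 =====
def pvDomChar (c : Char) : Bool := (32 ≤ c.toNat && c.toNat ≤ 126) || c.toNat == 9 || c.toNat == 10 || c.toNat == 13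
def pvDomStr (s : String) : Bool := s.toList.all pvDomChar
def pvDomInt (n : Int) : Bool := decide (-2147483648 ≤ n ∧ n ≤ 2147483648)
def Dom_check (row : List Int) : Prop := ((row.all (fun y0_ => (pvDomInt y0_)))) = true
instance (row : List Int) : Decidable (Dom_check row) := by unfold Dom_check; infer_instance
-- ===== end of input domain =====

-- B replaces A's quadratic per-element row.count scans by a frequency dict plus a counts-of-counts histogram (faster: asymptotic).

-- ===== PORT A =====
-- state = (povtor_2, povtor_3, uniq)
def check (row : List Int) : Bool :=
  let s := row.foldl (fun (s : List Int × List Int × List Int) num =>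
      let s := if PySem.List.count row num == 3 then (s.1, s.2.1 ++ [num], s.2.2) else s
      let s := if PySem.List.count row num == 2 then (s.1 ++ [num], s.2.1, s.2.2) else s
      let s := if PySem.List.count row num == 1 then (s.1, s.2.1, s.2.2 ++ [num]) else s
      s) (([] : List Int), ([] : List Int), ([] : List Int))
  (s.2.1.length == 3) && (s.1.length == 2) && (s.2.2.length == 3)

-- ===== PORT B =====
def check_alt (row : List Int) : Bool :=
  let c : PySem.Dict Int Int := row.foldl (fun d x => d.insert x (d.getD x 0 + 1)) PySem.Dict.empty
  let hist : PySem.Dict Int Int := c.values.foldl (fun d v => d.insert v (d.getD v 0 + 1)) PySem.Dict.empty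
  (hist.getD 3 0 == 1) && (hist.getD 2 0 == 1) && (hist.getD 1 0 == 3)

-- ===== PRECONDITION & SPEC =====
def Spec_check (row : List Int) (out : Bool) : Prop := out = check_alt row
instance (row : List Int) (out : Bool) : Decidable (Spec_check row out) := by unfold Spec_check; infer_instance

-- ===== CLAIM (what is proved, stated in full; the proofs are below) =====
def Claim_equal_check : Prop := ∀ (row : List Int), Dom_check row → Spec_check row (check row)

-- ===== LEMMAS AND PROOFS =====

-- A's loop appends each element to the bucket matching its multiplicity: the final buckets are filters of row.
theorem check_foldl_filter (row l : List Int) (s : List Int × List Int × List Int) :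
    l.foldl (fun (s : List Int × List Int × List Int) num =>
      let s := if PySem.List.count row num == 3 then (s.1, s.2.1 ++ [num], s.2.2) else s
      let s := if PySem.List.count row num == 2 then (s.1 ++ [num], s.2.1, s.2.2) else s
      let s := if PySem.List.count row num == 1 then (s.1, s.2.1, s.2.2 ++ [num]) else s
      s) s
    = (s.1 ++ l.filter (fun x => PySem.List.count row x == 2),
       s.2.1 ++ l.filter (fun x => PySem.List.count row x == 3),
       s.2.2 ++ l.filter (fun x => PySem.List.count row x == 1)) := by
  induction l generalizing s with
  | nil => simp
  | cons a t ih =>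
    simp only [List.foldl_cons, List.filter_cons, ih]
    split_ifs <;> simp_all

-- grouped count: the number of elements of row whose multiplicity is n equals n times
-- the number of distinct values of multiplicity n
theorem countP_count_eq (row : List Int) (n : Nat) :
    row.countP (fun x => row.count x == n) = n * (List.countP (fun x => row.count x == n) (PySem.Set.ofList row)) := by
  classical
  set q : Int → Bool := fun x => row.count x == n with hq
  have hnd : (PySem.Set.ofList row).Nodup := PySem.Set.nodup_ofList row
  have hrhs : List.countP q (PySem.Set.ofList row)
      = (row.toFinset.filter (fun x => q x)).card := by
    rw [List.countP_eq_length_filter, ← List.toFinset_card_of_nodup (hnd.filter _),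
        List.toFinset_filter]
    congr 1
    ext a
    simp [PySem.Set.mem_ofList]
  have hlhs : row.countP q = n * (row.toFinset.filter (fun a => q a)).card := by
    calc row.countP q
        = Multiset.card (Multiset.filter (fun x => q x = true) (↑row)) := by
          rw [List.countP_eq_length_filter]; simp
      _ = ∑ a ∈ row.toFinset, (Multiset.filter (fun x => q x = true) (↑row)).count a := by
          rw [Multiset.sum_count_eq_card]
          intro a ha
          have := Multiset.mem_of_mem_filter ha
          simpa using this
      _ = ∑ a ∈ row.toFinset.filter (fun a => q a), row.count a := by
          rw [Finset.sum_filter]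
          refine Finset.sum_congr rfl (fun a _ => ?_)
          rw [Multiset.count_filter]
          simp
      _ = ∑ _a ∈ row.toFinset.filter (fun a => q a), n := by
          refine Finset.sum_congr rfl (fun a ha => ?_)
          have hqa : q a := (Finset.mem_filter.mp ha).2
          rw [hq] at hqa
          simpa using hqa
      _ = n * (row.toFinset.filter (fun a => q a)).card := by
          rw [Finset.sum_const, smul_eq_mul, mul_comm]
  rw [hlhs, hrhs]

-- B's histogram lookup counts distinct values of the given multiplicity
theorem meta_getD (row : List Int) (n : Nat) :
    (((row.foldl (fun d x => d.insert x (d.getD x 0 + 1)) PySem.Dict.empty : PySem.Dict Int Int)).values.foldl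
        (fun d v => d.insert v (d.getD v 0 + 1)) PySem.Dict.empty).getD (n : Int) 0
      = (List.countP (fun x => row.count x == n) (PySem.Set.ofList row) : Int) := by
  rw [PySem.Dict.foldl_insert_getD_add_one_eq_counter, PySem.Dict.foldl_insert_getD_add_one_eq_counter,
      PySem.Dict.getD_counter]
  have hv : (PySem.Dict.counter row).values = (PySem.Set.ofList row).map (fun k => (row.count k : Int)) := by
    show ((PySem.Dict.counter row).items.map Prod.snd) = _
    rw [PySem.Dict.items_counter]
    simp [List.map_map, Function.comp]
  rw [hv]
  simp only [List.count, List.countP_map]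
  congr 1
  refine List.countP_congr (fun x _ => ?_)
  simp [Function.comp]

-- ===== VERDICT (by name: the statement is the Claim_ definition above) =====
theorem check_spec : Claim_equal_check := by
  intro row _
  unfold Spec_check check check_alt
  rw [check_foldl_filter]
  simp only [List.nil_append]
  have e3 := meta_getD row 3
  have e2 := meta_getD row 2
  have e1 := meta_getD row 1
  push_cast at e3 e2 e1
  rw [e3, e2, e1]
  have h3 := countP_count_eq row 3
  have h2 := countP_count_eq row 2
  have h1 := countP_count_eq row 1
  simp only [← List.countP_eq_length_filter, PySem.List.count_eq] at h3 h2 h1 ⊢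
  rw [h3, h2, h1]
  rw [Bool.eq_iff_iff]
  simp only [Bool.and_eq_true, beq_iff_eq]
  omega
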